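-- pv_equiv track=rewrite | github.com/ReverendKane/datawoven | apps/desktop/src/discovery_assistant/policy_utils.py | normalize_section_key
-- ===== SOURCE A (Python) =====
-- def normalize_section_key(section_name: str) -> str:
--     """
--     Convert section display names to consistent policy keys.
--
--     Examples:
--         "Respondent Info" -> "respondent_info"
--         "Org Map" -> "org_map"
--         "Time & Resource Management" -> "time_resource_management"
--
--     Args:
--         section_name: The human-readable section display name
--
--     Returns:
--         Normalized section key suitable for use in policy JSON
--     """
--     # Replace special characters and spaces with underscores
--     normalized = section_name.lower()
--     normalized = normalized.replace(" & ", "_")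
--     normalized = normalized.replace("&", "_")
--     normalized = normalized.replace(" ", "_")
--
--     # Remove any duplicate underscores
--     while "__" in normalized:
--         normalized = normalized.replace("__", "_")
--
--     # Remove leading/trailing underscores
--     normalized = normalized.strip("_")
--
--     return normalized
-- ===== SOURCE B (Python) =====
-- def normalize_section_key(section_name: str) -> str:
--     """Single-pass tokenizer: split on runs of ' ', '&', '_' and join with '_'."""
--     tokens = []
--     current = []
--     for ch in section_name.lower():
--         if ch in " &_":
--             if current:
--                 tokens.append("".join(current))
--                 current = []
--         else:
--             current.append(ch)
--     if current:
--         tokens.append("".join(current))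
--     return "_".join(tokens)
-- ===== Notes on version B (the rewrite author's own statement) =====
-- stated objective: simpler
-- what changed: Replaced the replace-chain plus while-collapse plus strip with a single left-to-right pass that tokenizes on runs of ' ', '&', '_' and joins the tokens with '_'.
import Mathlib
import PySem

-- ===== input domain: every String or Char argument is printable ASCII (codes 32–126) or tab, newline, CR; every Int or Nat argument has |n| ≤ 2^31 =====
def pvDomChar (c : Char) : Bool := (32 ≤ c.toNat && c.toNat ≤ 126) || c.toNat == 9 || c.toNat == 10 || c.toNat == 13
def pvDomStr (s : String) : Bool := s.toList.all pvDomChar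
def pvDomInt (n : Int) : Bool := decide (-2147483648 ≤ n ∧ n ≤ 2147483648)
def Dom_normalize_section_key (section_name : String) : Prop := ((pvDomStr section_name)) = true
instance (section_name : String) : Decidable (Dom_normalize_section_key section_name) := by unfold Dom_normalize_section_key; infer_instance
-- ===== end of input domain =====

-- B replaces A's replace-chain + while-collapse + strip with one tokenizing pass (split on runs of ' ','&','_', join with '_'); proved equal on all inputs.


-- ===== PORT A =====
-- helpers proving that 'normalized.replace("__", "_")' strictly shortens the string while
-- "__" occurs: the termination argument the while-loop port pyCollapse cites by name
theorem go_acc (old new : List Char) (fuel : Nat) : ∀ (l acc : List Char),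
    PySem.Chars.replace.go old new fuel l acc
      = acc.reverse ++ PySem.Chars.replace.go old new fuel l [] := by
  induction fuel with
  | zero => intro l acc; simp [PySem.Chars.replace.go]
  | succ fuel ih =>
    intro l acc
    cases l with
    | nil => simp [PySem.Chars.replace.go]
    | cons c t =>
      simp only [PySem.Chars.replace.go]
      split
      · rw [ih _ (new.reverse ++ acc), ih _ (new.reverse ++ [])]
        simp
      · rw [ih _ (c :: acc), ih _ (c :: [])]
        simp

theorem go_fuel (old new : List Char) (hold : old ≠ []) (f1 : Nat) : ∀ (f2 : Nat) (l acc : List Char),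
    l.length ≤ f1 → l.length ≤ f2 →
    PySem.Chars.replace.go old new f1 l acc = PySem.Chars.replace.go old new f2 l acc := by
  induction f1 with
  | zero =>
    intro f2 l acc h1 h2
    have : l = [] := by cases l <;> simp_all
    subst this
    cases f2 <;> simp [PySem.Chars.replace.go]
  | succ f1 ih =>
    intro f2 l acc h1 h2
    cases l with
    | nil => cases f2 <;> simp [PySem.Chars.replace.go]
    | cons c t =>
      cases f2 with
      | zero => simp at h2
      | succ f2 =>
        simp only [PySem.Chars.replace.go]
        split
        · have h0 : 0 < old.length := List.length_pos_iff.mpr hold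
          apply ih <;> simp_all <;> omega
        · apply ih <;> simp_all

theorem replace_nil (old new : List Char) (h : old ≠ []) :
    PySem.Chars.replace [] old new = [] := by
  simp [PySem.Chars.replace, PySem.Chars.replace.go, List.isEmpty_iff, h]

theorem replace_cons (old new : List Char) (h : old ≠ []) (c : Char) (t : List Char) :
    PySem.Chars.replace (c :: t) old new
      = if old.isPrefixOf (c :: t)
        then new ++ PySem.Chars.replace ((c :: t).drop old.length) old new
        else c :: PySem.Chars.replace t old new := by
  have h0 : 0 < old.length := List.length_pos_iff.mpr h
  have hne : old.isEmpty = false := by simp [h]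
  simp only [PySem.Chars.replace, hne, Bool.false_eq_true, if_false, List.length_cons]
  rw [show (t.length + 1 = Nat.succ t.length) from rfl]
  simp only [PySem.Chars.replace.go]
  split
  · rw [go_acc, go_fuel old new h t.length ((c :: t).drop old.length).length _ []
        (by simp; omega) (by simp)]
    simp
  · rw [go_acc]
    simp

theorem replace_dd_le : ∀ (l : List Char),
    (PySem.Chars.replace l ['_', '_'] ['_']).length ≤ l.length := by
  intro l
  induction hn : l.length using Nat.strong_induction_on generalizing l with
  | _ n ih =>
  subst hn
  cases l with
  | nil => rw [replace_nil _ _ (by simp)]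
  | cons c t =>
    rw [replace_cons _ _ (by simp)]
    split
    · rename_i hp
      have h2 : 2 ≤ (c :: t).length := List.IsPrefix.length_le (List.isPrefixOf_iff_prefix.mp hp)
      have := ih ((c :: t).drop 2).length (by simp) ((c :: t).drop 2) rfl
      simp at this ⊢
      omega
    · have := ih t.length (by simp) t rfl
      simp
      omega

theorem pyReplaceDD_length_lt (s : List Char) (h : PySem.Chars.isIn ['_', '_'] s = true) :
    (PySem.Chars.replace s ['_', '_'] ['_']).length < s.length := by
  rw [PySem.Chars.isIn_iff_infix] at h
  induction hn : s.length using Nat.strong_induction_on generalizing s with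
  | _ n ih =>
  subst hn
  cases s with
  | nil => exact absurd (List.eq_nil_of_infix_nil h) (by simp)
  | cons c t =>
    rw [replace_cons _ _ (by simp)]
    split
    · rename_i hp
      have h2 : 2 ≤ (c :: t).length := List.IsPrefix.length_le (List.isPrefixOf_iff_prefix.mp hp)
      have := replace_dd_le ((c :: t).drop 2)
      simp at this h2 ⊢
      omega
    · rename_i hp
      have hinf : ['_', '_'] <:+: t := by
        rcases List.infix_cons_iff.mp h with h' | h'
        · exact absurd (List.isPrefixOf_iff_prefix.mpr h') (by simp_all)
        · exact h'
      have := ih t.length (by simp) t hinf rfl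
      simp
      omega

-- the 'while "__" in normalized: normalized = normalized.replace("__", "_")' loop
def pyCollapse (s : List Char) : List Char :=
  if h : PySem.Chars.isIn ['_', '_'] s = true then
    pyCollapse (PySem.Chars.replace s ['_', '_'] ['_'])
  else s
termination_by s.length
decreasing_by exact pyReplaceDD_length_lt s h

-- line-for-line port of A: lower; replace " & "->"_"; replace "&"->"_"; replace " "->"_";
-- collapse "__" (while loop); strip("_")
def normalize_section_key (section_name : String) : String :=
  let n0 := PySem.Chars.lower section_name.toList
  let n1 := PySem.Chars.replace n0 [' ', '&', ' '] ['_']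
  let n2 := PySem.Chars.replace n1 ['&'] ['_']
  let n3 := PySem.Chars.replace n2 [' '] ['_']
  let n4 := pyCollapse n3
  let n5 := PySem.Chars.stripChars n4 ['_']
  String.ofList n5

-- ===== PORT B =====
-- loop body of Source B: ch in " &_" -> flush current (if nonempty); else append ch to current
def bStep (st : List (List Char) × List Char) (ch : Char) : List (List Char) × List Char :=
  if ch == ' ' || ch == '&' || ch == '_' then
    if st.2.isEmpty then st else (st.1 ++ [st.2], [])
  else (st.1, st.2 ++ [ch])

-- port of B: fold the loop body over the lowered string, final 'if current:' flush, "_".join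
def normalize_section_key_alt (section_name : String) : String :=
  let fin := (PySem.Chars.lower section_name.toList).foldl bStep ([], [])
  let toks := if fin.2.isEmpty then fin.1 else fin.1 ++ [fin.2]
  String.ofList (PySem.Chars.join ['_'] toks)

-- ===== PRECONDITION & SPEC =====
def Spec_normalize_section_key (section_name : String) (out : String) : Prop := out = normalize_section_key_alt section_name
instance (section_name : String) (out : String) : Decidable (Spec_normalize_section_key section_name out) := by unfold Spec_normalize_section_key; infer_instance

-- ===== CLAIM (what is proved, stated in full; the proofs are below) =====
def Claim_equal_normalize_section_key : Prop := ∀ (section_name : String), Dom_normalize_section_key section_name → Spec_normalize_section_key section_name (normalize_section_key section_name)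

-- ===== LEMMAS AND PROOFS =====
-- separator class shared by both programs
def isSep (c : Char) : Bool := c == ' ' || c == '&' || c == '_'

def toksFrom : List Char → List Char → List (List Char)
  | cur, [] => if cur.isEmpty then [] else [cur]
  | cur, c :: t =>
    if isSep c then (if cur.isEmpty then toksFrom [] t else cur :: toksFrom [] t)
    else toksFrom (cur ++ [c]) t

theorem toksFrom_ne_nil : ∀ (cs cur : List Char), cur ≠ [] → toksFrom cur cs ≠ [] := by
  intro cs
  induction cs with
  | nil => intro cur h; simp [toksFrom, List.isEmpty_iff, h]
  | cons c t ih =>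
    intro cur h
    simp only [toksFrom]
    split
    · simp [List.isEmpty_iff, h]
    · exact ih (cur ++ [c]) (by simp)

theorem toksFrom_sep_prefix (ss : List Char) (hss : ∀ c ∈ ss, isSep c = true) :
    ∀ rest, toksFrom [] (ss ++ rest) = toksFrom [] rest := by
  induction ss with
  | nil => intro rest; rfl
  | cons c t ih =>
    intro rest
    simp only [List.cons_append, toksFrom, hss c (by simp), if_true, List.isEmpty_nil]
    exact ih (fun x hx => hss x (by simp [hx])) rest

theorem toksFrom_sep_prefix' (ss : List Char) (hss : ∀ c ∈ ss, isSep c = true) (hne : ss ≠ [])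
    (cur rest : List Char) :
    toksFrom cur (ss ++ rest) = (if cur.isEmpty then [] else [cur]) ++ toksFrom [] rest := by
  cases ss with
  | nil => exact absurd rfl hne
  | cons c t =>
    simp only [List.cons_append, toksFrom, hss c (by simp), if_true]
    rw [toksFrom_sep_prefix t (fun x hx => hss x (by simp [hx])) rest]
    cases cur <;> simp

theorem toksFrom_replace (old new : List Char) (hone : old ≠ []) (hnewne : new ≠ [])
    (hold : ∀ c ∈ old, isSep c = true) (hnew : ∀ c ∈ new, isSep c = true) :
    ∀ (l cur : List Char), toksFrom cur (PySem.Chars.replace l old new) = toksFrom cur l := by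
  intro l
  induction hn : l.length using Nat.strong_induction_on generalizing l with
  | _ n ih =>
  subst hn
  cases l with
  | nil => intro cur; rw [replace_nil _ _ hone]
  | cons c t =>
    intro cur
    rw [replace_cons _ _ hone]
    split
    · rename_i hp
      rw [List.isPrefixOf_iff_prefix] at hp
      obtain ⟨d, hd⟩ := hp
      have hlen : old.length ≤ (c :: t).length := by
        rw [← hd]; simp
      have hdrop : (c :: t).drop old.length = d := by rw [← hd]; simp
      rw [hdrop]
      have hdlen : d.length < (c :: t).length := by
        have : old.length + d.length = (c :: t).length := by rw [← hd]; simp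
        have h0 : 0 < old.length := List.length_pos_iff.mpr hone
        omega
      rw [toksFrom_sep_prefix' new hnew hnewne]
      rw [ih d.length hdlen d rfl]
      conv_rhs => rw [← hd]
      rw [toksFrom_sep_prefix' old hold hone]
    · cases hsep : isSep c with
      | true =>
        simp only [toksFrom, hsep, if_true]
        simp only [ih t.length (by simp) t rfl]
      | false =>
        simp only [toksFrom, hsep]
        simp only [Bool.false_eq_true, if_false]
        exact ih t.length (by simp) t rfl (cur ++ [c])

theorem toksFrom_sep_suffix (ss : List Char) (hss : ∀ c ∈ ss, isSep c = true) :
    ∀ (xs cur : List Char), toksFrom cur (xs ++ ss) = toksFrom cur xs := by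
  intro xs
  induction xs with
  | nil =>
    intro cur
    cases hs : ss with
    | nil => simp
    | cons s0 st =>
      rw [List.nil_append, ← hs,
        show (toksFrom cur ss = toksFrom cur (ss ++ [])) by rw [List.append_nil],
        toksFrom_sep_prefix' ss hss (by simp [hs])]
      simp [toksFrom]
  | cons c t ih =>
    intro cur
    simp only [List.cons_append, toksFrom]
    split
    · split <;> rw [ih]
    · rw [ih]

theorem mem_replace (old new : List Char) (hone : old ≠ []) :
    ∀ (l : List Char) (x : Char), x ∈ PySem.Chars.replace l old new → x ∈ l ∨ x ∈ new := by
  intro l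
  induction hn : l.length using Nat.strong_induction_on generalizing l with
  | _ n ih =>
  subst hn
  cases l with
  | nil => intro x hx; rw [replace_nil _ _ hone] at hx; simp at hx
  | cons c t =>
    intro x hx
    rw [replace_cons _ _ hone] at hx
    split at hx
    · rename_i hp
      rcases List.mem_append.mp hx with h | h
      · right; exact h
      · have h0 : 0 < old.length := List.length_pos_iff.mpr hone
        rcases ih ((c :: t).drop old.length).length (by simp; omega) _ rfl x h with h' | h'
        · left; exact List.mem_of_mem_drop h'
        · right; exact h'
    · rcases List.mem_cons.mp hx with h | h
      · left; simp [h]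
      · rcases ih t.length (by simp) t rfl x h with h' | h'
        · left; simp [h']
        · right; exact h'

theorem not_mem_replace_single (a : Char) (new : List Char) (ha : a ∉ new) :
    ∀ (l : List Char), a ∉ PySem.Chars.replace l [a] new := by
  intro l
  induction hn : l.length using Nat.strong_induction_on generalizing l with
  | _ n ih =>
  subst hn
  cases l with
  | nil => rw [replace_nil _ _ (by simp)]; simp
  | cons c t =>
    rw [replace_cons _ _ (by simp)]
    split
    · rename_i hp
      intro hmem
      rcases List.mem_append.mp hmem with h | h
      · exact ha h
      · exact ih t.length (by simp) t rfl (by simpa using h)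
    · rename_i hp
      have hac : a ≠ c := by
        intro h; subst h
        exact hp (by simp)
      intro hmem
      rcases List.mem_cons.mp hmem with h | h
      · exact hac h
      · exact ih t.length (by simp) t rfl h

theorem toksFrom_pyCollapse (cs : List Char) : toksFrom [] (pyCollapse cs) = toksFrom [] cs := by
  induction cs using pyCollapse.induct with
  | case1 s h ih =>
    rw [pyCollapse, dif_pos h, ih, toksFrom_replace _ _ (by simp) (by simp) (by intro c hc; fin_cases hc <;> rfl) (by intro c hc; fin_cases hc <;> rfl)]
  | case2 s h => rw [pyCollapse, dif_neg h]

theorem mem_pyCollapse (cs : List Char) (x : Char) : x ∈ pyCollapse cs → x ∈ cs ∨ x = '_' := by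
  induction cs using pyCollapse.induct with
  | case1 s h ih =>
    rw [pyCollapse, dif_pos h]
    intro hx
    rcases ih hx with h' | h'
    · rcases mem_replace _ _ (by simp) _ _ h' with h'' | h''
      · left; exact h''
      · right; simpa using h''
    · right; exact h'
  | case2 s h => rw [pyCollapse, dif_neg h]; intro hx; left; exact hx

theorem pyCollapse_no_dd (cs : List Char) : ¬ (['_', '_'] <:+: pyCollapse cs) := by
  induction cs using pyCollapse.induct with
  | case1 s h ih => rw [pyCollapse, dif_pos h]; exact ih
  | case2 s h =>
    rw [pyCollapse, dif_neg h]
    rw [← PySem.Chars.isIn_iff_infix]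
    simpa using h

theorem head?_dropWhile_ne (p : Char → Bool) (l : List Char) :
    ∀ c, (l.dropWhile p).head? = some c → p c = false := by
  induction l with
  | nil => intro c h; simp at h
  | cons a t ih =>
    intro c h
    rw [List.dropWhile_cons] at h
    split at h
    · exact ih c h
    · rename_i hpa
      simp at h
      rw [← h]
      simpa using hpa

theorem stripChars_decomp (cs : List Char) :
    ∃ pre post, cs = pre ++ PySem.Chars.stripChars cs ['_'] ++ post
      ∧ (∀ c ∈ pre, c = '_') ∧ (∀ c ∈ post, c = '_')
      ∧ (PySem.Chars.stripChars cs ['_']).head? ≠ some '_'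
      ∧ (PySem.Chars.stripChars cs ['_']).getLast? ≠ some '_' := by
  set p : Char → Bool := fun c => (['_'] : List Char).contains c with hp
  set d1 : List Char := cs.dropWhile p with hd1
  set r : List Char := (d1.reverse.dropWhile p).reverse with hr
  have hstrip : PySem.Chars.stripChars cs ['_'] = r := by
    simp [PySem.Chars.stripChars, hr, hd1, hp]
  have h2 : d1.reverse.takeWhile p ++ d1.reverse.dropWhile p = d1.reverse :=
    List.takeWhile_append_dropWhile
  have hrd : r ++ (d1.reverse.takeWhile p).reverse = d1 := by
    rw [hr, ← List.reverse_append, h2, List.reverse_reverse]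
  refine ⟨cs.takeWhile p, (d1.reverse.takeWhile p).reverse, ?_, ?_, ?_, ?_, ?_⟩
  · rw [hstrip, List.append_assoc, hrd, hd1, List.takeWhile_append_dropWhile]
  · intro c hc
    have := List.mem_takeWhile_imp hc
    simpa [hp] using this
  · intro c hc
    have hc' : c ∈ d1.reverse.takeWhile p := by simpa using hc
    have := List.mem_takeWhile_imp hc'
    simpa [hp] using this
  · rw [hstrip]
    cases hcr : r with
    | nil => simp
    | cons c r' =>
      have hd1eq : d1 = c :: (r' ++ (d1.reverse.takeWhile p).reverse) := by
        conv_lhs => rw [← hrd, hcr]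
        simp
      have : p c = false := by
        apply head?_dropWhile_ne p cs
        rw [show cs.dropWhile p = d1 from hd1.symm, hd1eq]
        rfl
      simp only [List.head?_cons, ne_eq, Option.some.injEq]
      intro hceq
      rw [hceq] at this
      simp [hp] at this
  · rw [hstrip, ← List.head?_reverse]
    have hrrev : r.reverse = d1.reverse.dropWhile p := by simp [hr]
    rw [hrrev]
    cases hdp : d1.reverse.dropWhile p with
    | nil => simp
    | cons c rest =>
      have : p c = false := by
        apply head?_dropWhile_ne p d1.reverse
        rw [hdp]; rfl
      simp only [List.head?_cons, ne_eq, Option.some.injEq]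
      intro hceq
      rw [hceq] at this
      simp [hp] at this

theorem toks_reconstruct : ∀ (cs cur : List Char),
    (∀ c ∈ cs, isSep c = true → c = '_') →
    ¬ (['_', '_'] <:+: cs) →
    cs.getLast? ≠ some '_' →
    (cur = [] → cs.head? ≠ some '_') →
    PySem.Chars.join ['_'] (toksFrom cur cs) = cur ++ cs := by
  intro cs
  induction cs with
  | nil =>
    intro cur _ _ _ _
    cases cur with
    | nil => simp [toksFrom, PySem.Chars.join, List.intercalate]
    | cons a b => simp [toksFrom, PySem.Chars.join_singleton]
  | cons c t ih =>
    intro cur hall hdd hlast hhead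
    cases hsep : isSep c with
    | false =>
      simp only [toksFrom, hsep, Bool.false_eq_true, if_false]
      rw [ih (cur ++ [c])
        (fun x hx hs => hall x (by simp [hx]) hs)
        (fun hinf => hdd (List.infix_cons hinf))
        (by
          cases t with
          | nil => simp
          | cons d t' => simpa using hlast)
        (by intro hcontra; simp at hcontra)]
      simp
    | true =>
      have hcu : c = '_' := hall c (by simp) hsep
      subst hcu
      cases hcur : cur with
      | nil =>
        exact absurd rfl (hhead hcur)
      | cons a b =>
        rw [← hcur]
        have hcurne : cur ≠ [] := by rw [hcur]; simp
        simp only [toksFrom, hsep, if_true, List.isEmpty_iff, if_neg hcurne]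
        cases ht : t with
        | nil => rw [ht] at hlast; simp at hlast
        | cons d t' =>
          have hdne : d ≠ '_' := by
            intro hd
            exact hdd (by rw [ht, hd]; exact ⟨[], t', by simp⟩)
          have hdnsep : isSep d = false := by
            cases hds : isSep d with
            | false => rfl
            | true => exact absurd (hall d (by simp [ht]) hds) hdne
          have htoks : toksFrom [] t = toksFrom [d] t' := by
            rw [ht]
            simp [toksFrom, hdnsep]
          have hne : toksFrom [] t ≠ [] := by
            rw [htoks]; exact toksFrom_ne_nil t' [d] (by simp)
          have hrec := ih []
            (fun x hx hs => hall x (by simp [hx]) hs)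
            (fun hinf => hdd (List.infix_cons hinf))
            (by rw [ht] at hlast ⊢; simpa using hlast)
            (by
              intro _
              rw [ht]
              simpa using hdne)
          obtain ⟨y, r, hyr⟩ : ∃ y r, toksFrom [] t = y :: r := by
            cases hx : toksFrom [] t with
            | nil => exact absurd hx hne
            | cons y r => exact ⟨y, r, rfl⟩
          rw [← ht, hyr, PySem.Chars.join_cons_cons, ← hyr, hrec]
          simp

theorem foldB : ∀ (cs : List Char) (toks : List (List Char)) (cur : List Char),
    (if (cs.foldl bStep (toks, cur)).2.isEmpty
     then (cs.foldl bStep (toks, cur)).1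
     else (cs.foldl bStep (toks, cur)).1 ++ [(cs.foldl bStep (toks, cur)).2])
      = toks ++ toksFrom cur cs := by
  intro cs
  induction cs with
  | nil =>
    intro toks cur
    cases cur <;> simp [toksFrom]
  | cons c t ih =>
    intro toks cur
    simp only [List.foldl_cons]
    show (if ((t.foldl bStep (bStep (toks, cur) c))).2.isEmpty then _ else _) = _
    cases hsep : isSep c with
    | true =>
      have hb : bStep (toks, cur) c
          = if cur.isEmpty then (toks, cur) else (toks ++ [cur], []) := by
        simp [bStep, show (c == ' ' || c == '&' || c == '_') = true from hsep]
      cases hcur : cur with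
      | nil =>
        rw [hcur] at hb
        simp only [List.isEmpty_nil, if_true] at hb
        rw [hb, ih toks []]
        simp [toksFrom, hsep]
      | cons a b =>
        rw [hcur] at hb
        simp only [List.isEmpty_cons, Bool.false_eq_true, if_false] at hb
        rw [hb, ih (toks ++ [a :: b]) []]
        simp [toksFrom, hsep]
    | false =>
      have hb : bStep (toks, cur) c = (toks, cur ++ [c]) := by
        simp [bStep, show (c == ' ' || c == '&' || c == '_') = false from hsep]
      rw [hb, ih toks (cur ++ [c])]
      simp [toksFrom, hsep]

theorem main_equal (s : String) : normalize_section_key s = normalize_section_key_alt s := by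
  unfold normalize_section_key normalize_section_key_alt
  dsimp only
  set n0 : List Char := PySem.Chars.lower s.toList with hn0
  set n1 : List Char := PySem.Chars.replace n0 [' ', '&', ' '] ['_'] with hn1
  set n2 : List Char := PySem.Chars.replace n1 ['&'] ['_'] with hn2
  set n3 : List Char := PySem.Chars.replace n2 [' '] ['_'] with hn3
  set n4 : List Char := pyCollapse n3 with hn4
  set n5 : List Char := PySem.Chars.stripChars n4 ['_'] with hn5
  -- B computes join of toksFrom [] n0
  rw [foldB n0 [] []]
  simp only [List.nil_append]
  -- chain: toksFrom [] n0 = toksFrom [] n5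
  obtain ⟨pre, post, hsplit, hpre, hpost, hhead, hlast⟩ := stripChars_decomp n4
  rw [← hn5] at hsplit hhead hlast
  have ht1 : toksFrom [] n1 = toksFrom [] n0 :=
    toksFrom_replace _ _ (by simp) (by simp)
      (by intro c hc; fin_cases hc <;> rfl)
      (by intro c hc; fin_cases hc <;> rfl) n0 []
  have ht2 : toksFrom [] n2 = toksFrom [] n1 :=
    toksFrom_replace _ _ (by simp) (by simp)
      (by intro c hc; fin_cases hc <;> rfl)
      (by intro c hc; fin_cases hc <;> rfl) n1 []
  have ht3 : toksFrom [] n3 = toksFrom [] n2 :=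
    toksFrom_replace _ _ (by simp) (by simp)
      (by intro c hc; fin_cases hc <;> rfl)
      (by intro c hc; fin_cases hc <;> rfl) n2 []
  have ht4 : toksFrom [] n4 = toksFrom [] n3 := toksFrom_pyCollapse n3
  have ht5 : toksFrom [] n4 = toksFrom [] n5 := by
    conv_lhs => rw [hsplit]
    rw [List.append_assoc]
    rw [toksFrom_sep_prefix pre (by intro c hc; rw [hpre c hc]; rfl)]
    rw [toksFrom_sep_suffix post (by intro c hc; rw [hpost c hc]; rfl)]
  have hchain : toksFrom [] n0 = toksFrom [] n5 := by
    rw [← ht1, ← ht2, ← ht3, ← ht4, ht5]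
  rw [hchain]
  -- membership facts
  have hspace : ' ' ∉ n3 := not_mem_replace_single ' ' ['_'] (by decide) n2
  have hamp2 : '&' ∉ n2 := not_mem_replace_single '&' ['_'] (by decide) n1
  have hamp3 : '&' ∉ n3 := by
    intro h
    rcases mem_replace [' '] ['_'] (by simp) n2 '&' h with h' | h'
    · exact hamp2 h'
    · simp at h'
  have hsub5 : ∀ c ∈ n5, c ∈ n4 := by
    intro c hc
    rw [hsplit]
    simp [hc]
  have hall : ∀ c ∈ n5, isSep c = true → c = '_' := by
    intro c hc hs
    have h4 : c ∈ n4 := hsub5 c hc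
    have h3 : c ∈ n3 ∨ c = '_' := mem_pyCollapse n3 c h4
    simp only [isSep, Bool.or_eq_true, beq_iff_eq] at hs
    rcases hs with (h | h) | h
    · subst h
      rcases h3 with h' | h'
      · exact absurd h' hspace
      · exact h'
    · subst h
      rcases h3 with h' | h'
      · exact absurd h' hamp3
      · exact h'
    · exact h
  have hdd5 : ¬ (['_', '_'] <:+: n5) := by
    intro h
    apply pyCollapse_no_dd n3
    rw [← hn4, hsplit]
    obtain ⟨u, v, huv⟩ := h
    exact ⟨pre ++ u, v ++ post, by rw [← huv]; simp⟩
  rw [toks_reconstruct n5 [] hall hdd5 hlast (fun _ => hhead)]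
  simp

-- ===== VERDICT (by name: the statement is the Claim_ definition above) =====
theorem normalize_section_key_spec : Claim_equal_normalize_section_key := by
  intro section_name _
  unfold Spec_normalize_section_key
  exact main_equal section_name
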